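-- pv_equiv track=rewrite | github.com/grrlkk/UKTA_v2 | backend/apps/cohesion/adjacent_overlap.py | adjacent_two_sentence_overlap_noun_lemmas_normed
-- ===== SOURCE A (Python) =====
-- def is_noun_lemma(pos_tag):
--     return "N" in pos_tag and pos_tag != "ON"
--
-- def adjacent_two_sentence_overlap_noun_lemmas_normed(now, target1, target2):
--     lemma = set(item[1] for item in now if is_noun_lemma(item[1]))
--     return (
--         1
--         if any(item[1] in lemma for item in target1)
--         and any(item[1] in lemma for item in target2)
--         else 0
--     )
-- ===== SOURCE B (Python) =====
-- def is_noun_lemma(pos_tag):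
--     return "N" in pos_tag and pos_tag != "ON"
--
-- def adjacent_two_sentence_overlap_noun_lemmas_normed(now, target1, target2):
--     # Index the targets instead of `now`; one short-circuiting pass over `now`.
--     s1 = set(item[1] for item in target1)
--     s2 = set(item[1] for item in target2)
--     found1 = found2 = False
--     for item in now:
--         tag = item[1]
--         if is_noun_lemma(tag):
--             if tag in s1:
--                 found1 = True
--             if tag in s2:
--                 found2 = True
--             if found1 and found2:
--                 break
--     return 1 if found1 and found2 else 0
-- ===== Notes on version B (the rewrite author's own statement) =====
-- stated objective: alternative
-- what changed: Instead of building a set of noun lemmas from `now` and scanning each target for membership, B builds lemma sets from the two targets and makes one short-circuiting pass over `now`, setting two flags and breaking when both are found.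
import Mathlib
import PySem

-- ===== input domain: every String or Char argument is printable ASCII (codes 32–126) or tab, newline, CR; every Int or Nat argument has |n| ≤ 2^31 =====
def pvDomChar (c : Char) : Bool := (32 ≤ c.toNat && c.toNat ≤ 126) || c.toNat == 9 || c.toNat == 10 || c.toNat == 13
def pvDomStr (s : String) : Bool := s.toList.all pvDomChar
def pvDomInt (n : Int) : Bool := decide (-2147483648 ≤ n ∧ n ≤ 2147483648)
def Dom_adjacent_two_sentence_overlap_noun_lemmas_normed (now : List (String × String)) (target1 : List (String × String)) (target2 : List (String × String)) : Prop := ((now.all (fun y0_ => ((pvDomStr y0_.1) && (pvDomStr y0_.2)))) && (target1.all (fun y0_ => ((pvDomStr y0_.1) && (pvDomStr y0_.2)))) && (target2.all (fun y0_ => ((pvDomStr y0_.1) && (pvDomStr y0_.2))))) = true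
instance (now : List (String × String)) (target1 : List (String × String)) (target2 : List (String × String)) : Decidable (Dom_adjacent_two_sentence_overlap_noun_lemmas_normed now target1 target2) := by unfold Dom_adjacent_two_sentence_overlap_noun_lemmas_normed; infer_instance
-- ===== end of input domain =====

-- B replaces A's now-indexed set + two target scans by target-indexed sets + one
-- short-circuiting pass over `now` (objective: alternative decomposition, same cost).

-- ===== PORT A =====
def is_noun_lemma (pos_tag : String) : Bool :=
  PySem.Str.isIn "N" pos_tag && !(pos_tag == "ON")

def adjacent_two_sentence_overlap_noun_lemmas_normed (now : List (String × String)) (target1 : List (String × String)) (target2 : List (String × String)) : Int :=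
  let lemmaSet : PySem.Set String :=
    PySem.Set.ofList ((now.filter (fun item => is_noun_lemma item.2)).map Prod.snd)
  if (target1.any (fun item => PySem.Set.contains lemmaSet item.2))
      && (target2.any (fun item => PySem.Set.contains lemmaSet item.2)) then 1 else 0

-- ===== PORT B =====
def is_noun_lemma_alt (pos_tag : String) : Bool :=
  PySem.Str.isIn "N" pos_tag && !(pos_tag == "ON")

-- the `for item in now` loop of Source B, with its early break
def altLoop (s1 s2 : PySem.Set String) : List (String × String) → Bool → Bool → Bool × Bool
  | [], f1, f2 => (f1, f2)
  | item :: rest, f1, f2 =>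
    if is_noun_lemma_alt item.2 then
      if (f1 || PySem.Set.contains s1 item.2) && (f2 || PySem.Set.contains s2 item.2) then
        (f1 || PySem.Set.contains s1 item.2, f2 || PySem.Set.contains s2 item.2)
      else
        altLoop s1 s2 rest (f1 || PySem.Set.contains s1 item.2) (f2 || PySem.Set.contains s2 item.2)
    else altLoop s1 s2 rest f1 f2

def adjacent_two_sentence_overlap_noun_lemmas_normed_alt (now : List (String × String)) (target1 : List (String × String)) (target2 : List (String × String)) : Int :=
  let s1 : PySem.Set String := PySem.Set.ofList (target1.map Prod.snd)
  let s2 : PySem.Set String := PySem.Set.ofList (target2.map Prod.snd)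
  let r := altLoop s1 s2 now false false
  if r.1 && r.2 then 1 else 0

-- ===== PRECONDITION & SPEC =====
def Spec_adjacent_two_sentence_overlap_noun_lemmas_normed (now : List (String × String)) (target1 : List (String × String)) (target2 : List (String × String)) (out : Int) : Prop := out = adjacent_two_sentence_overlap_noun_lemmas_normed_alt now target1 target2
instance (now : List (String × String)) (target1 : List (String × String)) (target2 : List (String × String)) (out : Int) : Decidable (Spec_adjacent_two_sentence_overlap_noun_lemmas_normed now target1 target2 out) := by unfold Spec_adjacent_two_sentence_overlap_noun_lemmas_normed; infer_instance

-- ===== CLAIM (what is proved, stated in full; the proofs are below) =====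
def Claim_equal_adjacent_two_sentence_overlap_noun_lemmas_normed : Prop := ∀ (now : List (String × String)) (target1 : List (String × String)) (target2 : List (String × String)), Dom_adjacent_two_sentence_overlap_noun_lemmas_normed now target1 target2 → Spec_adjacent_two_sentence_overlap_noun_lemmas_normed now target1 target2 (adjacent_two_sentence_overlap_noun_lemmas_normed now target1 target2)

-- ===== LEMMAS AND PROOFS =====

-- the break does not change the loop's result: it computes the two "any" flags
theorem altLoop_eq (s1 s2 : PySem.Set String) (l : List (String × String)) (f1 f2 : Bool) :
    altLoop s1 s2 l f1 f2 =
      (f1 || l.any (fun it => is_noun_lemma_alt it.2 && PySem.Set.contains s1 it.2),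
       f2 || l.any (fun it => is_noun_lemma_alt it.2 && PySem.Set.contains s2 it.2)) := by
  induction l generalizing f1 f2 with
  | nil => simp [altLoop]
  | cons h t ih =>
    simp only [altLoop, List.any_cons]
    split_ifs with hn hb
    · rw [Bool.and_eq_true] at hb
      obtain ⟨h1, h2⟩ := hb
      simp [hn, Prod.ext_iff]
      constructor
      · cases f1 <;> simp_all
      · cases f2 <;> simp_all
    · rw [ih]
      simp [hn, Bool.or_assoc]
    · rw [ih]
      simp [Bool.eq_false_iff.mpr hn]

-- the two decompositions test the same proposition on each side
theorem side_eq (now tgt : List (String × String)) :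
    (tgt.any (fun item => PySem.Set.contains
        (PySem.Set.ofList ((now.filter (fun it => is_noun_lemma it.2)).map Prod.snd)) item.2))
    = (now.any (fun it => is_noun_lemma_alt it.2 &&
        PySem.Set.contains (PySem.Set.ofList (tgt.map Prod.snd)) it.2)) := by
  rw [Bool.eq_iff_iff]
  simp only [List.any_eq_true, Bool.and_eq_true, PySem.Set.contains_iff,
    PySem.Set.mem_ofList, List.mem_map, List.mem_filter]
  constructor
  · rintro ⟨t, ht, n, ⟨hn, hnoun⟩, he⟩
    exact ⟨n, hn, hnoun, t, ht, he.symm⟩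
  · rintro ⟨n, hn, hnoun, t, ht, he⟩
    exact ⟨t, ht, n, ⟨hn, hnoun⟩, he.symm⟩

-- ===== VERDICT (by name: the statement is the Claim_ definition above) =====
theorem adjacent_two_sentence_overlap_noun_lemmas_normed_spec : Claim_equal_adjacent_two_sentence_overlap_noun_lemmas_normed := by
  intro now target1 target2 _
  unfold Spec_adjacent_two_sentence_overlap_noun_lemmas_normed
  unfold adjacent_two_sentence_overlap_noun_lemmas_normed
  unfold adjacent_two_sentence_overlap_noun_lemmas_normed_alt
  simp only [altLoop_eq, Bool.false_or]
  rw [side_eq now target1, side_eq now target2]
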